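-- pv_equiv track=rewrite | github.com/Tada0/Cheapest-Pizza | Mechanics/Replacer.py | Uni_Replacer
-- ===== SOURCE A (Python) =====
-- def Uni_Replacer(string):
--     replacements = {
--         '\\xc4\\x84': 'Ą',
--         '\\xc4\\x86': 'Ć',
--         '\\xc4\\x98': 'Ę',
--         '\\xc5\\x81': 'Ł',
--         '\\xc5\\x83': 'Ń',
--         '\\xc3\\x93': 'Ó',
--         '\\xc5\\x9a': 'Ś',
--         '\\xc5\\xb9': 'Ź',
--         '\\xc5\\xbb': 'Ż',
--         '\\xc4\\x85': 'ą',
--         '\\xc4\\x87': 'ć',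
--         '\\xc4\\x99': 'ę',
--         '\\xc5\\x82': 'ł',
--         '\\xc5\\x84': 'ń',
--         '\\xc3\\xb3': 'ó',
--         '\\xc5\\x9b': 'ś',
--         '\\xc5\\xba': 'ź',
--         '\\xc5\\xbc': 'ż'
--     }
--
--     work_text = string
--
--     for k, v in replacements.items():
--         work_text = work_text.replace(k, v)
--
--     return work_text
-- ===== SOURCE B (Python) =====
-- def Uni_Replacer(string):
--     replacements = {
--         '\\xc4\\x84': 'Ą',
--         '\\xc4\\x86': 'Ć',
--         '\\xc4\\x98': 'Ę',
--         '\\xc5\\x81': 'Ł',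
--         '\\xc5\\x83': 'Ń',
--         '\\xc3\\x93': 'Ó',
--         '\\xc5\\x9a': 'Ś',
--         '\\xc5\\xb9': 'Ź',
--         '\\xc5\\xbb': 'Ż',
--         '\\xc4\\x85': 'ą',
--         '\\xc4\\x87': 'ć',
--         '\\xc4\\x99': 'ę',
--         '\\xc5\\x82': 'ł',
--         '\\xc5\\x84': 'ń',
--         '\\xc3\\xb3': 'ó',
--         '\\xc5\\x9b': 'ś',
--         '\\xc5\\xba': 'ź',
--         '\\xc5\\xbc': 'ż'
--     }
--
--     out = []
--     i = 0
--     n = len(string)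
--     while i < n:
--         chunk = string[i:i + 8]
--         if chunk in replacements:
--             out.append(replacements[chunk])
--             i += 8
--         else:
--             out.append(string[i])
--             i += 1
--     return ''.join(out)
-- ===== Notes on version B (the rewrite author's own statement) =====
-- stated objective: alternative
-- what changed: A makes 18 sequential full-string str.replace passes (one per dict entry); B makes a single left-to-right scan that matches the 8-character chunk at the current position against the dict and emits either the replacement or one character.
import Mathlib
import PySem

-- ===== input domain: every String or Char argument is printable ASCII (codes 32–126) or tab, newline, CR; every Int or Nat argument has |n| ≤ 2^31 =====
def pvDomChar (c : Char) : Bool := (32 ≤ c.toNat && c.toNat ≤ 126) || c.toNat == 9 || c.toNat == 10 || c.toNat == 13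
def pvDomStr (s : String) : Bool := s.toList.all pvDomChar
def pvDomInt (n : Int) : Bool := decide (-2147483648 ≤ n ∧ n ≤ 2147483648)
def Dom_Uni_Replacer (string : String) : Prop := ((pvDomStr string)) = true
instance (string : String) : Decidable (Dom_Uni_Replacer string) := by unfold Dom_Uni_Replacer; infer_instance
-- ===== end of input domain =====

set_option maxRecDepth 8192


-- ===== PORT A =====
-- B replaces A's 18 sequential full-string str.replace passes by one left-to-right scan; return values proved equal on all inputs.
def pvTabA : List (String × String) := [
  ("\\xc4\\x84", "Ą"),
  ("\\xc4\\x86", "Ć"),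
  ("\\xc4\\x98", "Ę"),
  ("\\xc5\\x81", "Ł"),
  ("\\xc5\\x83", "Ń"),
  ("\\xc3\\x93", "Ó"),
  ("\\xc5\\x9a", "Ś"),
  ("\\xc5\\xb9", "Ź"),
  ("\\xc5\\xbb", "Ż"),
  ("\\xc4\\x85", "ą"),
  ("\\xc4\\x87", "ć"),
  ("\\xc4\\x99", "ę"),
  ("\\xc5\\x82", "ł"),
  ("\\xc5\\x84", "ń"),
  ("\\xc3\\xb3", "ó"),
  ("\\xc5\\x9b", "ś"),
  ("\\xc5\\xba", "ź"),
  ("\\xc5\\xbc", "ż")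
]
def pvTabB : List (List Char × List Char) := [
  (['\\', 'x', 'c', '4', '\\', 'x', '8', '4'], ['Ą']),
  (['\\', 'x', 'c', '4', '\\', 'x', '8', '6'], ['Ć']),
  (['\\', 'x', 'c', '4', '\\', 'x', '9', '8'], ['Ę']),
  (['\\', 'x', 'c', '5', '\\', 'x', '8', '1'], ['Ł']),
  (['\\', 'x', 'c', '5', '\\', 'x', '8', '3'], ['Ń']),
  (['\\', 'x', 'c', '3', '\\', 'x', '9', '3'], ['Ó']),
  (['\\', 'x', 'c', '5', '\\', 'x', '9', 'a'], ['Ś']),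
  (['\\', 'x', 'c', '5', '\\', 'x', 'b', '9'], ['Ź']),
  (['\\', 'x', 'c', '5', '\\', 'x', 'b', 'b'], ['Ż']),
  (['\\', 'x', 'c', '4', '\\', 'x', '8', '5'], ['ą']),
  (['\\', 'x', 'c', '4', '\\', 'x', '8', '7'], ['ć']),
  (['\\', 'x', 'c', '4', '\\', 'x', '9', '9'], ['ę']),
  (['\\', 'x', 'c', '5', '\\', 'x', '8', '2'], ['ł']),
  (['\\', 'x', 'c', '5', '\\', 'x', '8', '4'], ['ń']),
  (['\\', 'x', 'c', '3', '\\', 'x', 'b', '3'], ['ó']),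
  (['\\', 'x', 'c', '5', '\\', 'x', '9', 'b'], ['ś']),
  (['\\', 'x', 'c', '5', '\\', 'x', 'b', 'a'], ['ź']),
  (['\\', 'x', 'c', '5', '\\', 'x', 'b', 'c'], ['ż'])
]

-- port of A: work_text = string; for k, v in replacements.items(): work_text = work_text.replace(k, v)
def Uni_Replacer (string : String) : String :=
  let replacements : List (String × String) := pvTabA
  let work_text := string
  replacements.foldl (fun wt kv => PySem.Str.replace wt kv.1 kv.2) work_text

-- ===== PORT B =====
-- port of B's while loop: chunk = string[i:i+8]; if chunk in replacements: emit value, i += 8; else emit string[i], i += 1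
def pvScanB : List Char → List Char
  | [] => []
  | c :: t =>
    match (PySem.Dict.mk pvTabB).get? ((c :: t).take 8) with
    | some v => v ++ pvScanB (t.drop 7)
    | none => c :: pvScanB t
termination_by s => s.length
decreasing_by
  all_goals simp

def Uni_Replacer_alt (string : String) : String :=
  String.ofList (pvScanB string.toList)

-- ===== PRECONDITION & SPEC =====
def Spec_Uni_Replacer (string : String) (out : String) : Prop := out = Uni_Replacer_alt string
instance (string : String) (out : String) : Decidable (Spec_Uni_Replacer string out) := by unfold Spec_Uni_Replacer; infer_instance

-- ===== CLAIM (what is proved, stated in full; the proofs are below) =====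
def Claim_equal_Uni_Replacer : Prop := ∀ (string : String), Dom_Uni_Replacer string → Spec_Uni_Replacer string (Uni_Replacer string)

-- ===== LEMMAS AND PROOFS =====

-- concrete facts about the table, decided at the Bool level
lemma pvLenB : ∀ kv ∈ pvTabB, kv.1.length = 8 ∧ kv.2.length = 1 := by decide

lemma pvNodupB : (pvTabB.map Prod.fst).Nodup := by decide

-- no replacement value character occurs in any key
lemma pvValB : ∀ kv ∈ pvTabB, ∀ kv' ∈ pvTabB, ∀ ch ∈ kv.2, ch ∉ kv'.1 := by
  have h : (pvTabB.all (fun kv => pvTabB.all (fun kv' => kv.2.all (fun ch => !(kv'.1.contains ch))))) = true := by decide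
  simp only [List.all_eq_true, Bool.not_eq_true'] at h
  intro kv hkv kv' hkv' ch hch
  have := h kv hkv kv' hkv' ch hch
  simpa using this

-- no proper overlap between (distinct or equal) keys: a tail of one key is never a head of another
lemma pvOvB : ∀ kv ∈ pvTabB, ∀ kv' ∈ pvTabB, ∀ o < 8, (o = 0 → kv.1 ≠ kv'.1) →
    kv'.1.take (8 - o) ≠ kv.1.drop o := by
  have h : ((List.range 8).all (fun o => pvTabB.all (fun kv => pvTabB.all (fun kv' =>
      (decide (o = 0) && decide (kv.1 = kv'.1)) || !(decide (kv'.1.take (8 - o) = kv.1.drop o)))))) = true := by decide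
  intro kv hkv kv' hkv' o ho hne
  simp only [List.all_eq_true, List.mem_range] at h
  have := h o ho kv hkv kv' hkv'
  simp only [Bool.or_eq_true, Bool.and_eq_true, decide_eq_true_eq, Bool.not_eq_true',
    decide_eq_false_iff_not] at this
  rcases this with ⟨h0, hk⟩ | h2
  · exact absurd hk (hne h0)
  · exact h2

-- replace.go: the accumulator is a reversed prefix
lemma pvGoAcc (old new : List Char) : ∀ fuel l acc,
    PySem.Chars.replace.go old new fuel l acc = acc.reverse ++ PySem.Chars.replace.go old new fuel l [] := by
  intro fuel
  induction fuel with
  | zero => intro l acc; simp [PySem.Chars.replace.go]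
  | succ n ih =>
    intro l acc
    cases l with
    | nil => simp [PySem.Chars.replace.go]
    | cons c t =>
      simp only [PySem.Chars.replace.go]
      split
      · rw [ih _ (new.reverse ++ acc), ih _ (new.reverse ++ [])]
        simp
      · rw [ih t (c :: acc), ih t (c :: [])]
        simp

-- replace.go ignores extra fuel
lemma pvGoFuel (old new : List Char) (hold : old ≠ []) : ∀ n l fuel fuel', l.length ≤ n → l.length ≤ fuel → l.length ≤ fuel' →
    PySem.Chars.replace.go old new fuel l [] = PySem.Chars.replace.go old new fuel' l [] := by
  intro n
  induction n with
  | zero =>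
    intro l fuel fuel' hn _ _
    have : l = [] := List.eq_nil_of_length_eq_zero (Nat.le_zero.mp hn)
    subst this
    cases fuel <;> cases fuel' <;> simp [PySem.Chars.replace.go]
  | succ m ih =>
    intro l fuel fuel' hn hf hf'
    cases l with
    | nil => cases fuel <;> cases fuel' <;> simp [PySem.Chars.replace.go]
    | cons c t =>
      simp only [List.length_cons] at hn hf hf'
      cases fuel with
      | zero => omega
      | succ f =>
        cases fuel' with
        | zero => omega
        | succ f' =>
          have hone : 1 ≤ old.length := by
            cases old with
            | nil => exact absurd rfl hold
            | cons _ _ => simp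
          simp only [PySem.Chars.replace.go]
          split
          · rw [pvGoAcc old new f, pvGoAcc old new f']
            have hd : (List.drop old.length (c :: t)).length ≤ m := by
              simp [List.length_drop]; omega
            rw [ih _ f f' hd (by simp [List.length_drop]; omega) (by simp [List.length_drop]; omega)]
          · rw [pvGoAcc old new f, pvGoAcc old new f']
            rw [ih t f f' (by omega) (by omega) (by omega)]

-- one-step unfolding of Python's str.replace
lemma pvReplNil (old new : List Char) (hold : old ≠ []) : PySem.Chars.replace [] old new = [] := by
  simp [PySem.Chars.replace, hold, PySem.Chars.replace.go]

lemma pvReplCons (old new : List Char) (hold : old ≠ []) (c : Char) (t : List Char) :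
    PySem.Chars.replace (c :: t) old new =
      if old.isPrefixOf (c :: t) then new ++ PySem.Chars.replace ((c :: t).drop old.length) old new
      else c :: PySem.Chars.replace t old new := by
  have hE : old.isEmpty = false := by simp [hold]
  have hone : 1 ≤ old.length := by
    cases old with
    | nil => exact absurd rfl hold
    | cons _ _ => simp
  simp only [PySem.Chars.replace, hE, Bool.false_eq_true, if_false, List.length_cons]
  simp only [PySem.Chars.replace.go]
  split
  · rw [pvGoAcc old new t.length]
    have hd : (List.drop old.length (c :: t)).length ≤ t.length := by
      simp [List.length_drop]; omega
    rw [pvGoFuel old new hold t.length _ t.length (List.drop old.length (c :: t)).length hd hd le_rfl]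
    simp
  · rw [pvGoAcc old new t.length]
    simp

lemma pvReplConsNo (old new : List Char) (hold : old ≠ []) (c : Char) (t : List Char)
    (h : ¬ old <+: (c :: t)) :
    PySem.Chars.replace (c :: t) old new = c :: PySem.Chars.replace t old new := by
  rw [pvReplCons old new hold]
  simp [List.isPrefixOf_iff_prefix, h]

lemma pvReplMatch (old new : List Char) (hold : old ≠ []) (rest : List Char) :
    PySem.Chars.replace (old ++ rest) old new = new ++ PySem.Chars.replace rest old new := by
  cases old with
  | nil => exact absurd rfl hold
  | cons o ot =>
    rw [show (o :: ot) ++ rest = o :: (ot ++ rest) from rfl, pvReplCons _ _ hold]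
    have hpre : (o :: ot).isPrefixOf (o :: (ot ++ rest)) = true := by
      rw [List.isPrefixOf_iff_prefix]
      exact ⟨rest, rfl⟩
    rw [if_pos hpre]
    congr 1
    congr 1
    rw [show o :: (ot ++ rest) = (o :: ot) ++ rest from rfl]
    simp

-- replace skips over a block that no occurrence of `old` can touch
lemma pvReplAppend (old new : List Char) (hold : old ≠ []) :
    ∀ (p X : List Char), p.length ≤ old.length →
    (∀ o < p.length, old.take (p.length - o) ≠ p.drop o) →
    PySem.Chars.replace (p ++ X) old new = p ++ PySem.Chars.replace X old new := by
  intro p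
  induction p with
  | nil => intro X _ _; simp
  | cons a p' ih =>
    intro X hlen H
    have hnp : ¬ old <+: (a :: p') ++ X := by
      intro hpre
      obtain ⟨srest, hs⟩ := hpre
      have h1 : ((a :: p') ++ X).take (a :: p').length = a :: p' := by simp
      have h2 : (old ++ srest).take (a :: p').length = old.take (a :: p').length := by
        exact List.take_append_of_le_length hlen
      rw [← hs] at h1
      rw [h2] at h1
      have := H 0 (by simp)
      simp only [Nat.sub_zero, List.drop_zero] at this
      exact this h1
    rw [show (a :: p') ++ X = a :: (p' ++ X) from rfl,
        pvReplConsNo old new hold a (p' ++ X) (by rwa [show a :: (p' ++ X) = (a :: p') ++ X from rfl])]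
    congr 1
    exact ih X (le_trans (by simp) hlen) (fun o ho => by
      have := H (o + 1) (by simp; omega)
      simpa using this)

-- the first n characters of replace's output are unchanged unless a replacement character landed among them
lemma pvReplTake (old new : List Char) (hold : old ≠ []) (hnew : new ≠ []) :
    ∀ (s : List Char) (n : Nat),
      (PySem.Chars.replace s old new).take n = s.take n ∨
      ∃ ch ∈ new, ch ∈ (PySem.Chars.replace s old new).take n := by
  have main : ∀ (m : Nat) (s : List Char), s.length ≤ m → ∀ (n : Nat),
      (PySem.Chars.replace s old new).take n = s.take n ∨
      ∃ ch ∈ new, ch ∈ (PySem.Chars.replace s old new).take n := by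
    intro m
    induction m with
    | zero =>
      intro s hs n
      have : s = [] := List.eq_nil_of_length_eq_zero (Nat.le_zero.mp hs)
      subst this
      left; rw [pvReplNil old new hold]
    | succ m ih =>
      intro s hs n
      cases s with
      | nil => left; rw [pvReplNil old new hold]
      | cons c t =>
        rw [pvReplCons old new hold]
        split
        · cases n with
          | zero => left; simp
          | succ n' =>
            right
            cases new with
            | nil => exact absurd rfl hnew
            | cons v vt => exact ⟨v, by simp, by simp⟩
        · cases n with
          | zero => left; simp
          | succ n' =>
            rcases ih t (by simpa using hs) n' with h | ⟨ch, hch, hmem⟩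
            · left; simp [h]
            · right; exact ⟨ch, hch, by simp [hmem]⟩
  intro s n
  exact main s.length s le_rfl n

-- the sequential pass of A, at the character-list level
def pvStep (w : List Char) (kv : List Char × List Char) : List Char := PySem.Chars.replace w kv.1 kv.2
def pvChain (s : List Char) : List Char := pvTabB.foldl pvStep s

-- a head character no key can start at commutes with every pass
lemma pvFoldlCons : ∀ (M : List (List Char × List Char)), (∀ kv ∈ M, kv ∈ pvTabB) →
    ∀ (c : Char) (t t' : List Char),
    (t'.take 7 = t.take 7 ∨ ∃ kv ∈ pvTabB, ∃ ch ∈ kv.2, ch ∈ t'.take 7) →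
    (∀ kv ∈ pvTabB, ¬ kv.1 <+: (c :: t)) →
    M.foldl pvStep (c :: t') = c :: M.foldl pvStep t' := by
  intro M
  induction M with
  | nil => intro _ c t t' _ _; rfl
  | cons kv M' ih =>
    intro hM c t t' hinv hH
    have hkv : kv ∈ pvTabB := hM kv (by simp)
    have hk8 : kv.1.length = 8 := (pvLenB kv hkv).1
    have hkne : kv.1 ≠ [] := by intro h; rw [h] at hk8; simp at hk8
    have hnp : ¬ kv.1 <+: (c :: t') := by
      intro hpre
      have heq : kv.1 = (c :: t').take 8 := by
        have := List.prefix_iff_eq_take.mp hpre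
        rwa [hk8] at this
      rw [List.take_succ_cons] at heq
      rcases hinv with hsame | ⟨kv0, hkv0, ch, hch, hmem⟩
      · apply hH kv hkv
        rw [heq, hsame]
        exact List.cons_prefix_cons.mpr ⟨rfl, List.take_prefix 7 t⟩
      · have : ch ∈ kv.1 := by rw [heq]; exact List.mem_cons_of_mem c hmem
        exact pvValB kv0 hkv0 kv hkv ch hch this
    rw [List.foldl_cons]
    rw [show pvStep (c :: t') kv = PySem.Chars.replace (c :: t') kv.1 kv.2 from rfl,
        pvReplConsNo kv.1 kv.2 hkne c t' hnp]
    apply ih (fun p hp => hM p (by simp [hp])) c t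
    · have hv1 : kv.2 ≠ [] := by
        have := (pvLenB kv hkv).2
        intro h; rw [h] at this; simp at this
      rcases pvReplTake kv.1 kv.2 hkne hv1 t' 7 with h | ⟨ch, hch, hmem⟩
      · rcases hinv with hsame | ⟨kv0, hkv0, ch, hch, hmem⟩
        · left; rw [h, hsame]
        · right; exact ⟨kv0, hkv0, ch, hch, by rwa [h]⟩
      · right; exact ⟨kv, hkv, ch, hch, hmem⟩
    · exact hH

-- a leading key distinct from every key of M commutes with M's passes
lemma pvFoldlKey : ∀ (M : List (List Char × List Char)), (∀ kv ∈ M, kv ∈ pvTabB) →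
    ∀ (k : List Char × List Char), k ∈ pvTabB → (∀ kv ∈ M, kv.1 ≠ k.1) →
    ∀ X, M.foldl pvStep (k.1 ++ X) = k.1 ++ M.foldl pvStep X := by
  intro M
  induction M with
  | nil => intro _ _ _ _ _; rfl
  | cons kv M' ih =>
    intro hM k hk hne X
    have hkv : kv ∈ pvTabB := hM kv (by simp)
    have hkv8 : kv.1.length = 8 := (pvLenB kv hkv).1
    have hk8 : k.1.length = 8 := (pvLenB k hk).1
    have hkne : kv.1 ≠ [] := by intro h; rw [h] at hkv8; simp at hkv8
    rw [List.foldl_cons]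
    rw [show pvStep (k.1 ++ X) kv = PySem.Chars.replace (k.1 ++ X) kv.1 kv.2 from rfl]
    rw [pvReplAppend kv.1 kv.2 hkne k.1 X (by omega)
      (fun o ho => by
        rw [hk8] at ho
        have := pvOvB k hk kv hkv o ho (fun _ => (hne kv (by simp)).symm)
        rw [hk8]
        convert this using 2)]
    rw [List.foldl_cons, show pvStep X kv = PySem.Chars.replace X kv.1 kv.2 from rfl]
    exact ih (fun p hp => hM p (by simp [hp])) k hk (fun p hp => hne p (by simp [hp])) _

-- a leading replacement character commutes with every pass
lemma pvFoldlVal : ∀ (M : List (List Char × List Char)), (∀ kv ∈ M, kv ∈ pvTabB) →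
    ∀ (v : Char), (∀ kv ∈ pvTabB, v ∉ kv.1) →
    ∀ X, M.foldl pvStep (v :: X) = v :: M.foldl pvStep X := by
  intro M
  induction M with
  | nil => intro _ _ _ _; rfl
  | cons kv M' ih =>
    intro hM v hv X
    have hkv : kv ∈ pvTabB := hM kv (by simp)
    have hkv8 : kv.1.length = 8 := (pvLenB kv hkv).1
    have hkne : kv.1 ≠ [] := by intro h; rw [h] at hkv8; simp at hkv8
    have hnp : ¬ kv.1 <+: (v :: X) := by
      intro hpre
      have : v ∈ kv.1 := by
        cases hk1 : kv.1 with
        | nil => exact absurd hk1 hkne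
        | cons a l =>
          obtain ⟨r, hr⟩ := hpre
          rw [hk1] at hr
          simp only [List.cons_append, List.cons.injEq] at hr
          rw [hr.1]
          simp
      exact hv kv hkv this
    rw [List.foldl_cons]
    rw [show pvStep (v :: X) kv = PySem.Chars.replace (v :: X) kv.1 kv.2 from rfl,
        pvReplConsNo kv.1 kv.2 hkne v X hnp]
    rw [List.foldl_cons, show pvStep X kv = PySem.Chars.replace X kv.1 kv.2 from rfl]
    exact ih (fun p hp => hM p (by simp [hp])) v hv _

lemma pvChainNil : pvChain [] = [] := by decide

lemma pvChainCons (c : Char) (t : List Char) (h : ∀ kv ∈ pvTabB, ¬ kv.1 <+: (c :: t)) :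
    pvChain (c :: t) = c :: pvChain t :=
  pvFoldlCons pvTabB (fun _ h => h) c t t (Or.inl rfl) h

lemma pvChainMatch (kv : List Char × List Char) (hkv : kv ∈ pvTabB) (r : List Char) :
    pvChain (kv.1 ++ r) = kv.2 ++ pvChain r := by
  obtain ⟨pref, suff, hsplit⟩ := List.append_of_mem hkv
  have hk8 : kv.1.length = 8 := (pvLenB kv hkv).1
  have hkne : kv.1 ≠ [] := by intro h; rw [h] at hk8; simp at hk8
  have hprefmem : ∀ p ∈ pref, p ∈ pvTabB := fun p hp => by rw [hsplit]; simp [hp]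
  have hsuffmem : ∀ p ∈ suff, p ∈ pvTabB := fun p hp => by rw [hsplit]; simp [hp]
  have hprefne : ∀ p ∈ pref, p.1 ≠ kv.1 := by
    intro p hp
    have hnd := pvNodupB
    rw [hsplit, List.map_append, List.map_cons] at hnd
    have hdisj := List.disjoint_of_nodup_append hnd
    intro he
    exact hdisj (List.mem_map_of_mem hp) (by rw [he]; exact List.mem_cons_self)
  obtain ⟨v, hv⟩ : ∃ v, kv.2 = [v] := by
    have := (pvLenB kv hkv).2
    cases h2 : kv.2 with
    | nil => rw [h2] at this; simp at this
    | cons a l =>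
      rw [h2] at this
      simp at this
      exact ⟨a, by rw [this]⟩
  have hvnk : ∀ p ∈ pvTabB, v ∉ p.1 := fun p hp =>
    pvValB kv hkv p hp v (by rw [hv]; simp)
  unfold pvChain
  rw [hsplit, List.foldl_append, List.foldl_cons, List.foldl_append, List.foldl_cons]
  rw [pvFoldlKey pref hprefmem kv hkv hprefne r]
  rw [show pvStep (kv.1 ++ pref.foldl pvStep r) kv
      = PySem.Chars.replace (kv.1 ++ pref.foldl pvStep r) kv.1 kv.2 from rfl,
    pvReplMatch kv.1 kv.2 hkne]
  rw [hv, List.singleton_append, pvFoldlVal suff hsuffmem v hvnk]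
  simp [pvStep, hv]

-- the chain of passes equals the single scan
lemma pvChainScan : ∀ (n : Nat) (s : List Char), s.length ≤ n → pvChain s = pvScanB s := by
  intro n
  induction n with
  | zero =>
    intro s hs
    have : s = [] := List.eq_nil_of_length_eq_zero (Nat.le_zero.mp hs)
    subst this
    rw [pvChainNil, pvScanB]
  | succ n ih =>
    intro s hs
    cases s with
    | nil => rw [pvChainNil, pvScanB]
    | cons c t =>
      cases hg : (PySem.Dict.mk pvTabB).get? ((c :: t).take 8) with
      | some v =>
        have hnd : (PySem.Dict.mk pvTabB).keys.Nodup := by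
          simpa [PySem.Dict.keys] using pvNodupB
        have hmem : ((c :: t).take 8, v) ∈ pvTabB := by
          have := (PySem.Dict.get?_eq_some_iff_mem_items _ _ _ hnd).mp hg
          simpa [PySem.Dict.items] using this
        have hk8 : ((c :: t).take 8).length = 8 := (pvLenB _ hmem).1
        have hslen : 8 ≤ (c :: t).length := by
          simp only [List.length_take] at hk8
          omega
        have hsplit : (c :: t) = (c :: t).take 8 ++ (c :: t).drop 8 :=
          (List.take_append_drop 8 _).symm
        have hdl : ((c :: t).drop 8).length ≤ n := by
          simp only [List.length_drop, List.length_cons] at *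
          omega
        calc pvChain (c :: t)
            = pvChain ((c :: t).take 8 ++ (c :: t).drop 8) := by rw [← hsplit]
          _ = v ++ pvChain ((c :: t).drop 8) := pvChainMatch ((c :: t).take 8, v) hmem _
          _ = v ++ pvScanB ((c :: t).drop 8) := by rw [ih _ hdl]
          _ = pvScanB (c :: t) := by
              rw [pvScanB, hg]
              simp
      | none =>
        have hH : ∀ kv ∈ pvTabB, ¬ kv.1 <+: (c :: t) := by
          intro kv hkv hpre
          have hk8 : kv.1.length = 8 := (pvLenB kv hkv).1
          have heq : kv.1 = (c :: t).take 8 := by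
            have := List.prefix_iff_eq_take.mp hpre
            rwa [hk8] at this
          have hkeys : (c :: t).take 8 ∈ (PySem.Dict.mk pvTabB).keys := by
            rw [← heq]
            simpa [PySem.Dict.keys] using List.mem_map_of_mem (f := Prod.fst) hkv
          exact (PySem.Dict.get?_eq_none_iff_not_mem_keys _ _).mp hg hkeys
        rw [pvChainCons c t hH, ih t (by simpa using Nat.succ_le_succ_iff.mp hs), pvScanB, hg]

lemma pvToListFoldl : ∀ (P : List (String × String)) (w : String),
    (P.foldl (fun wt kv => PySem.Str.replace wt kv.1 kv.2) w).toList
      = (P.map (fun kv => (kv.1.toList, kv.2.toList))).foldl pvStep w.toList := by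
  intro P
  induction P with
  | nil => intro w; rfl
  | cons kv P ih =>
    intro w
    simp only [List.foldl_cons, List.map_cons, ih, pvStep, PySem.Str.toList_replace]

lemma pvTabAB : pvTabA.map (fun kv => (kv.1.toList, kv.2.toList)) = pvTabB := by decide

-- ===== VERDICT (by name: the statement is the Claim_ definition above) =====
theorem Uni_Replacer_spec : Claim_equal_Uni_Replacer := by
  intro string _
  unfold Spec_Uni_Replacer Uni_Replacer Uni_Replacer_alt
  have h1 : (pvTabA.foldl (fun wt kv => PySem.Str.replace wt kv.1 kv.2) string).toList
      = pvChain string.toList := by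
    rw [pvToListFoldl, pvTabAB]; rfl
  have h2 := pvChainScan string.toList.length string.toList le_rfl
  have : (pvTabA.foldl (fun wt kv => PySem.Str.replace wt kv.1 kv.2) string).toList
      = pvScanB string.toList := h1.trans h2
  calc pvTabA.foldl (fun wt kv => PySem.Str.replace wt kv.1 kv.2) string
      = String.ofList (pvTabA.foldl (fun wt kv => PySem.Str.replace wt kv.1 kv.2) string).toList := by simp
    _ = String.ofList (pvScanB string.toList) := by rw [this]
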